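-- pv_equiv track=rewrite | github.com/SongJeongHun/algorithm | 2021.06/더 맵게.py | solution
-- ===== SOURCE A (Python) =====
-- import heapq
--
-- def solution(scoville, K):
--     queue = []
--     count = 0
--     for i in scoville:
--         heapq.heappush(queue,i)
--     while queue[0] < K:
--         new = heapq.heappop(queue) + heapq.heappop(queue) * 2
--         heapq.heappush(queue,new)
--         count += 1
--         if len(queue) == 1 and queue[0] < K:
--             return - 1
--     return count
-- ===== SOURCE B (Python) =====
-- def solution(scoville, K):
--     foods = list(scoville)
--     count = 0
--     while min(foods) < K:
--         if len(foods) == 1: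
--             return -1
--         a = min(foods)
--         foods.remove(a)
--         b = min(foods)
--         foods.remove(b)
--         foods.append(a + 2 * b)
--         count += 1
--     return count
-- ===== Notes on version B (the rewrite author's own statement) =====
-- stated objective: simpler
-- what changed: Replaces the heapq min-heap with a plain list processed by repeated min-scan-and-remove, with the moot single-element check hoisted to the top of the loop.
import Mathlib
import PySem

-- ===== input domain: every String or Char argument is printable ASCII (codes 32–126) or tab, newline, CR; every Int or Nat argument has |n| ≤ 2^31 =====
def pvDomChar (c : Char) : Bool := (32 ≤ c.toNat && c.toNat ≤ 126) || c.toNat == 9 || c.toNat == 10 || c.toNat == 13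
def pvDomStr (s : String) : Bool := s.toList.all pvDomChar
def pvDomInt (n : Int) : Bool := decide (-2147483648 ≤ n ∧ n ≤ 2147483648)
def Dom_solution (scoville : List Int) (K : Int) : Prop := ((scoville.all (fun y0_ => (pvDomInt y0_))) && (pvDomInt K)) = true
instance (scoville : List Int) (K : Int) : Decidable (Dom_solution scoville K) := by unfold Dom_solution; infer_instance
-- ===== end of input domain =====

-- B replaces A's heapq min-heap with a plain list and a repeated min-scan/remove loop (simpler, no heap);
-- neither version mutates its arguments, so return-value equivalence is the whole story.

-- ===== PORT A =====
-- heapq on a list of Ints is observed only through heappop/queue[0] (the minimum) and heappush;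
-- it is ported as an ordered list: heappush = ordered insert, heappop = head.  Exact for Int values.
def heapPush (q : List Int) (x : Int) : List Int := q.orderedInsert (· ≤ ·) x

-- A's while-loop; queue kept as the sorted heap, count the accumulator; `fuel` is a totality guard
-- only (each iteration shortens the queue by one, so `fuel = queue.length` never runs out).
-- `[]`: queue[0] raises IndexError (outside Pre_), junk value -1.
-- `[x]` with x < K: the second heappop raises IndexError (outside Pre_), junk value -1.
def solLoopA (K : Int) : Nat → List Int → Int → Int
  | 0, _, _ => -1
  | _ + 1, [], _ => -1
  | _ + 1, [x], count => if x < K then -1 else count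
  | fuel + 1, a :: b :: rest, count =>
    if a < K then
      let q' := heapPush rest (a + b * 2)
      if q'.length = 1 ∧ q'.headI < K then -1
      else solLoopA K fuel q' (count + 1)
    else count

def solution (scoville : List Int) (K : Int) : Int :=
  let queue := scoville.foldl (fun q i => heapPush q i) []
  solLoopA K queue.length queue 0

-- ===== PORT B =====
-- Source B's while-loop: scan for the min, remove it, scan again, remove, append a + 2*b.
-- `fuel` is a totality guard only (each iteration shortens the list by one, `fuel = foods.length`
-- never runs out).  min([]) raises ValueError (outside Pre_): junk value -1; the `none`
-- remove?/min? branches after a successful min are unreachable.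
def solLoopB (K : Int) : Nat → List Int → Int → Int
  | 0, _, _ => -1
  | fuel + 1, foods, count =>
    match PySem.List.min? foods (fun x => x) with
    | none => -1
    | some a =>
      if a < K then
        if foods.length = 1 then -1
        else
          match PySem.List.remove? foods a with
          | none => -1
          | some f1 =>
            match PySem.List.min? f1 (fun x => x) with
            | none => -1
            | some b =>
              match PySem.List.remove? f1 b with
              | none => -1
              | some f2 => solLoopB K fuel (f2 ++ [a + 2 * b]) (count + 1)
      else count

def solution_alt (scoville : List Int) (K : Int) : Int :=
  solLoopB K scoville.length scoville 0

-- ===== PRECONDITION & SPEC =====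
-- Pre_ excludes exactly the inputs where A raises IndexError: the empty list (queue[0] on an empty
-- heap) and a one-element list whose element is below K (the second heappop pops an empty heap).
def Pre_solution (scoville : List Int) (K : Int) : Prop :=
  scoville ≠ [] ∧ ¬(scoville.length = 1 ∧ scoville.headI < K)
instance (scoville : List Int) (K : Int) : Decidable (Pre_solution scoville K) := by
  unfold Pre_solution; infer_instance

def pvWitness_solution : List Int × Int := ([1, 2, 3, 9, 10, 12], 7)

def Spec_solution (scoville : List Int) (K : Int) (out : Int) : Prop := out = solution_alt scoville K
instance (scoville : List Int) (K : Int) (out : Int) : Decidable (Spec_solution scoville K out) := by unfold Spec_solution; infer_instance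

-- ===== CLAIM (what is proved, stated in full; the proofs are below) =====
def Claim_equal_solution : Prop := ∀ (scoville : List Int) (K : Int), Dom_solution scoville K → Pre_solution scoville K → Spec_solution scoville K (solution scoville K)

-- ===== LEMMAS AND PROOFS =====

-- A's initial foldl of heappushes builds a sorted permutation of scoville.
theorem foldl_heapPush_sorted (l : List Int) :
    ∀ acc : List Int, acc.Pairwise (· ≤ ·) →
      (l.foldl (fun q i => heapPush q i) acc).Pairwise (· ≤ ·) ∧
      (l.foldl (fun q i => heapPush q i) acc).Perm (l ++ acc) := by
  induction l with
  | nil => intro acc h; simpa using h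
  | cons x t ih =>
    intro acc h
    have hs : (heapPush acc x).Pairwise (· ≤ ·) := List.Pairwise.orderedInsert x acc h
    obtain ⟨s1, p1⟩ := ih (heapPush acc x) hs
    refine ⟨s1, ?_⟩
    exact (p1.trans (List.Perm.append_left t (List.perm_orderedInsert _ x acc))).trans
      List.perm_middle

-- Python's min over a permutation of a sorted list is that list's head.
theorem min?_of_sorted_perm {a : Int} {t l : List Int}
    (hs : (a :: t).Pairwise (· ≤ ·)) (hp : (a :: t).Perm l) :
    PySem.List.min? l (fun x => x) = some a := by
  have hne : l ≠ [] := by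
    intro h; subst h; simpa using hp.length_eq
  obtain ⟨m, hm⟩ : ∃ m, PySem.List.min? l (fun x => x) = some m := by
    cases h : PySem.List.min? l (fun x => x) with
    | none => exact absurd ((PySem.List.min?_eq_none_iff l _).mp h) hne
    | some m => exact ⟨m, rfl⟩
  have hmin : ∀ y ∈ l, m ≤ y := fun y hy => PySem.List.min?_isMin hm y hy
  have hsorted : ∀ y ∈ (a :: t), a ≤ y := by
    intro y hy
    rcases List.mem_cons.mp hy with rfl | hyt
    · exact le_refl y
    · exact (List.pairwise_cons.mp hs).1 y hyt
  have h1 : a ≤ m := hsorted m (hp.mem_iff.mpr (PySem.List.min?_mem hm))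
  have h2 : m ≤ a := hmin a (hp.mem_iff.mp (by simp))
  rw [hm]; exact congrArg some (le_antisymm h2 h1)

-- main loop invariant: A's sorted queue vs B's unordered list, equal as multisets, same fuel.
theorem loop_eq (K : Int) : ∀ (fuel : Nat) (q l : List Int) (count : Int),
    q.Pairwise (· ≤ ·) → q.Perm l → solLoopA K fuel q count = solLoopB K fuel l count := by
  intro fuel
  induction fuel with
  | zero => intro q l count _ _; simp [solLoopA, solLoopB]
  | succ n ih =>
    intro q l count hs hp
    match q, hp with
    | [], hp =>
      obtain rfl : l = [] := (List.Perm.nil_eq hp).symm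
      simp [solLoopA, solLoopB, PySem.List.min?]
    | [x], hp =>
      obtain rfl : l = [x] := List.Perm.eq_singleton hp.symm
      simp only [solLoopA, solLoopB, PySem.List.min?_id_cons, List.foldl_nil, List.length_singleton]
      split_ifs <;> simp
    | a :: b :: rest, hp =>
      have hminl : PySem.List.min? l (fun x => x) = some a := min?_of_sorted_perm hs hp
      simp only [solLoopA, solLoopB, hminl]
      by_cases hak : a < K
      · simp only [if_pos hak]
        have hlen : l.length = rest.length + 2 := by simpa using hp.length_eq.symm
        have hlen1 : ¬ l.length = 1 := by omega
        simp only [if_neg hlen1]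
        -- first removal
        have hal : a ∈ l := hp.mem_iff.mp (by simp)
        simp only [PySem.List.remove?_eq_some_erase l a hal]
        have hp1 : (b :: rest).Perm (l.erase a) := by
          have h := List.Perm.erase a hp
          simpa using h
        have hs1 : (b :: rest).Pairwise (· ≤ ·) := hs.of_cons
        -- second min and removal
        have hminl1 : PySem.List.min? (l.erase a) (fun x => x) = some b :=
          min?_of_sorted_perm hs1 hp1
        simp only [hminl1]
        have hbl1 : b ∈ l.erase a := hp1.mem_iff.mp (by simp)
        simp only [PySem.List.remove?_eq_some_erase (l.erase a) b hbl1]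
        have hp2 : rest.Perm ((l.erase a).erase b) := by
          have h := List.Perm.erase b hp1
          simpa using h
        -- the new lists are permutations of each other
        have hpnew : (heapPush rest (a + b * 2)).Perm ((l.erase a).erase b ++ [a + 2 * b]) := by
          have hv : a + b * 2 = a + 2 * b := by ring
          have h1 : (heapPush rest (a + b * 2)).Perm ((a + 2 * b) :: rest) := by
            rw [← hv]; exact List.perm_orderedInsert _ _ rest
          exact (h1.trans (List.Perm.cons _ hp2)).trans (List.perm_append_singleton _ _).symm
        have hsnew : (heapPush rest (a + b * 2)).Pairwise (· ≤ ·) :=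
          List.Pairwise.orderedInsert _ rest hs1.of_cons
        by_cases hone : (heapPush rest (a + b * 2)).length = 1 ∧
            (heapPush rest (a + b * 2)).headI < K
        · -- A returns -1; B's next call sees a one-element list below K and returns -1 too
          simp only [if_pos hone]
          obtain ⟨h1len, h1hd⟩ := hone
          obtain ⟨v, hv⟩ : ∃ v, heapPush rest (a + b * 2) = [v] := by
            match hqq : heapPush rest (a + b * 2) with
            | [v] => exact ⟨v, rfl⟩
            | [] => rw [hqq] at h1len; simp at h1len
            | _ :: _ :: _ => rw [hqq] at h1len; simp at h1len
          have hvK : v < K := by rw [hv] at h1hd; simpa using h1hd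
          have hlsingle : (l.erase a).erase b ++ [a + 2 * b] = [v] := by
            have h := hpnew; rw [hv] at h
            exact h.symm.eq_singleton
          cases n with
          | zero => simp [solLoopB]
          | succ m =>
            rw [hlsingle, solLoopB]
            simp [PySem.List.min?_id_cons, hvK]
        · simp only [if_neg hone]
          exact ih _ _ _ hsnew hpnew
      · simp [if_neg hak]

-- ===== VERDICT (by name: the statement is the Claim_ definition above) =====
theorem solution_spec : Claim_equal_solution := by
  intro scoville K _hdom _hpre
  unfold Spec_solution solution solution_alt
  obtain ⟨hs, hp'⟩ := foldl_heapPush_sorted scoville [] (by simp)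
  have hp : (scoville.foldl (fun q i => heapPush q i) []).Perm scoville := by simpa using hp'
  have hlen : (scoville.foldl (fun q i => heapPush q i) []).length = scoville.length :=
    hp.length_eq
  simp only [hlen]
  exact loop_eq K scoville.length _ scoville 0 hs hp
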